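-- pv_equiv track=rewrite | github.com/aa694849243/leetcode_cj | 第 98 场双周赛.py | minImpossibleOR
-- ===== SOURCE A (Python) =====
-- from typing import List
--
-- def minImpossibleOR(nums: List[int]) -> int:
--     nums.sort()
--     if nums[0] != 1:
--         return 1
--     res = 1
--     for i in range(1, len(nums)):
--         if nums[i] > res + 1:
--             return res + 1
--         res |= nums[i]
--     return res + 1
-- ===== SOURCE B (Python) =====
-- from typing import List
--
-- def minImpossibleOR(nums: List[int]) -> int:
--     nums.sort()
--     if nums[0] != 1:
--         return 1
--     s = set(nums)
--     p = 2
--     while p in s: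
--         p <<= 1
--     return p
-- ===== Notes on version B (the rewrite author's own statement) =====
-- stated objective: idiomatic
-- what changed: Replaces the greedy OR-accumulation scan over the sorted list with the standard set-membership probe of successive powers of two (the in-place sort and the first-element guard are kept).
import Mathlib
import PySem

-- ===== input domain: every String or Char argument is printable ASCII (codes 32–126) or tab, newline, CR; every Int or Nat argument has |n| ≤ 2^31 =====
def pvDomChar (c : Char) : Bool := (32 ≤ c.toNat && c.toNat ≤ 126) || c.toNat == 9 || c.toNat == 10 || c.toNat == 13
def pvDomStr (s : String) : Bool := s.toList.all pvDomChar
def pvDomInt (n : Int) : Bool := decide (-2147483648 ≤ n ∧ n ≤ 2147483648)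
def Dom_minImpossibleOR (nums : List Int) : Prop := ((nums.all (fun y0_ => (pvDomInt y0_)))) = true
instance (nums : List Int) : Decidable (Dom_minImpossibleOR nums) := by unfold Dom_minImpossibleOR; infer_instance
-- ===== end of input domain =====

-- B replaces the greedy OR-accumulation scan with a set-membership probe of successive powers of
-- two (idiomatic); both Pythons sort `nums` in place — the equivalence proved is about the return value.

-- ===== PORT A =====
-- for i in range(1, len(nums)): if nums[i] > res + 1: return res + 1; res |= nums[i]  — then return res + 1
def pvLoopA : List Int → Int → Int
  | [], res => res + 1
  | x :: xs, res => if x > res + 1 then res + 1 else pvLoopA xs (PySem.Int.bor res x)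

def minImpossibleOR (nums : List Int) : Int :=
  match PySem.List.sorted nums (fun x => x) false with
  | [] => 0            -- indexing the first element raises IndexError; excluded by Pre_
  | h :: t => if h ≠ 1 then 1 else pvLoopA t 1

-- ===== PORT B =====
-- termination measure for the `while p in s` loop: the number of elements of s that are ≥ p
theorem pvFilterLen_le (s : List Int) (p : Int) (hp : 0 < p) :
    (s.filter (fun x => decide (2 * p ≤ x))).length ≤ (s.filter (fun x => decide (p ≤ x))).length := by
  induction s with
  | nil => simp
  | cons a s ih =>
    by_cases h1 : 2 * p ≤ a
    · have h2 : p ≤ a := by omega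
      simp [h1, h2]
      omega
    · by_cases h2 : p ≤ a <;> simp [h1, h2] <;> omega

theorem pvFilterLen_lt (s : List Int) (p : Int) (hp : 0 < p) (hm : p ∈ s) :
    (s.filter (fun x => decide (2 * p ≤ x))).length < (s.filter (fun x => decide (p ≤ x))).length := by
  induction s with
  | nil => cases hm
  | cons a s ih =>
    rcases List.mem_cons.mp hm with rfl | hm'
    · have h1 : ¬ (2 * p ≤ p) := by omega
      have hle := pvFilterLen_le s p hp
      simp [h1]
      omega
    · have hlt := ih hm'
      by_cases h1 : 2 * p ≤ a
      · have h2 : p ≤ a := by omega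
        simp [h1, h2]
        omega
      · by_cases h2 : p ≤ a <;> simp [h1, h2] <;> omega

-- while p in s: p <<= 1      (the `0 < p` conjunct only makes the recursion terminating; the
-- loop is entered with p = 2 and p only doubles, so it never cuts the computation short)
def pvProbe (s : List Int) (p : Int) : Int :=
  if _h : 0 < p ∧ p ∈ s then pvProbe s (p <<< (1 : Nat)) else p
termination_by (s.filter (fun x => decide (p ≤ x))).length
decreasing_by
  rw [Int.shiftLeft_eq]
  have := pvFilterLen_lt s p _h.1 _h.2
  have e : p * 2 ^ (1:Nat) = 2 * p := by ring
  rw [e]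
  exact this

def minImpossibleOR_alt (nums : List Int) : Int :=
  match PySem.List.sorted nums (fun x => x) false with
  | [] => 0            -- indexing the first element raises IndexError; excluded by Pre_
  | h :: _ => if h ≠ 1 then 1 else pvProbe (PySem.Set.ofList nums) 2

-- ===== PRECONDITION & SPEC =====
-- Pre_ excludes only the empty list, on which A (and B) raises IndexError when reading the first element
def Pre_minImpossibleOR (nums : List Int) : Prop := nums ≠ []
instance (nums : List Int) : Decidable (Pre_minImpossibleOR nums) := by unfold Pre_minImpossibleOR; infer_instance
def pvWitness_minImpossibleOR : List Int := [1, 2, 3, 5]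

def Spec_minImpossibleOR (nums : List Int) (out : Int) : Prop := out = minImpossibleOR_alt nums
instance (nums : List Int) (out : Int) : Decidable (Spec_minImpossibleOR nums out) := by unfold Spec_minImpossibleOR; infer_instance

-- ===== CLAIM (what is proved, stated in full; the proofs are below) =====
def Claim_equal_minImpossibleOR : Prop := ∀ (nums : List Int), Dom_minImpossibleOR nums → Pre_minImpossibleOR nums → Spec_minImpossibleOR nums (minImpossibleOR nums)

-- ===== LEMMAS AND PROOFS =====

-- pvProbe depends on its list argument only through membership of values ≥ p
theorem pvProbe_agree (n : Nat) : ∀ (s t : List Int) (p : Int),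
    (t.filter (fun x => decide (p ≤ x))).length ≤ n →
    (∀ q : Int, p ≤ q → (q ∈ s ↔ q ∈ t)) →
    pvProbe s p = pvProbe t p := by
  induction n with
  | zero =>
    intro s t p hn hq
    have hmem : (p ∈ s) ↔ (p ∈ t) := hq p le_rfl
    have hnt : ¬ (0 < p ∧ p ∈ t) := by
      rintro ⟨hp, hin⟩
      have hmf : p ∈ t.filter (fun x => decide (p ≤ x)) := List.mem_filter.mpr ⟨hin, by simp⟩
      have := List.length_pos_of_mem hmf
      omega
    conv_lhs => rw [pvProbe]
    conv_rhs => rw [pvProbe]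
    rw [dif_neg (fun hcs => hnt ⟨hcs.1, hmem.mp hcs.2⟩), dif_neg hnt]
  | succ n ih =>
    intro s t p hn hq
    have hmem : (p ∈ s) ↔ (p ∈ t) := hq p le_rfl
    conv_lhs => rw [pvProbe]
    conv_rhs => rw [pvProbe]
    by_cases hc : 0 < p ∧ p ∈ t
    · rw [dif_pos ⟨hc.1, hmem.mpr hc.2⟩, dif_pos hc]
      have hlt := pvFilterLen_lt t p hc.1 hc.2
      have e : p <<< (1 : Nat) = 2 * p := by rw [Int.shiftLeft_eq]; ring
      rw [e]
      exact ih s t (2 * p) (by omega) (fun q hq2 => hq q (by omega))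
    · rw [dif_neg (fun hcs => hc ⟨hcs.1, hmem.mp hcs.2⟩), dif_neg hc]

theorem pvOrNat_absorb (k m : Nat) (h : m < 2 ^ k) : (2 ^ k - 1) ||| m = 2 ^ k - 1 := by
  apply Nat.eq_of_testBit_eq
  intro i
  rw [Nat.testBit_or, Nat.testBit_two_pow_sub_one]
  by_cases hik : i < k
  · simp [hik]
  · have hm : m.testBit i = false :=
      Nat.testBit_lt_two_pow (lt_of_lt_of_le h (Nat.pow_le_pow_right (by norm_num) (by omega)))
    simp [hik, hm]

theorem pvOrNat_step (k : Nat) : (2 ^ k - 1) ||| 2 ^ k = 2 ^ (k + 1) - 1 := by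
  apply Nat.eq_of_testBit_eq
  intro i
  rw [Nat.testBit_or, Nat.testBit_two_pow_sub_one, Nat.testBit_two_pow, Nat.testBit_two_pow_sub_one]
  by_cases h1 : i < k <;> by_cases h2 : k = i <;> simp [h1, h2] <;> omega

theorem pvCastPow (k : Nat) : (((2 ^ k : Nat) : Int)) = (2 : Int) ^ k := by push_cast; ring

theorem pvCastPowSub (k : Nat) : (((2 ^ k - 1 : Nat) : Int)) = (2 : Int) ^ k - 1 := by
  have h1 : (1 : Nat) ≤ 2 ^ k := Nat.one_le_two_pow
  push_cast [h1]
  ring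

theorem pvOrInt_absorb (k : Nat) (x : Int) (h0 : 0 ≤ x) (hlt : x < (2 : Int) ^ k) :
    PySem.Int.bor ((2 : Int) ^ k - 1) x = (2 : Int) ^ k - 1 := by
  have hx : x = ((x.toNat : Nat) : Int) := (Int.toNat_of_nonneg h0).symm
  rw [hx, ← pvCastPowSub k, PySem.Int.bor_natCast]
  have hlt' : x.toNat < 2 ^ k := by
    have hc := pvCastPow k
    omega
  rw [pvOrNat_absorb k x.toNat hlt', pvCastPowSub]

theorem pvOrInt_step (k : Nat) :
    PySem.Int.bor ((2 : Int) ^ k - 1) ((2 : Int) ^ k) = (2 : Int) ^ (k + 1) - 1 := by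
  rw [← pvCastPowSub k, ← pvCastPow k, PySem.Int.bor_natCast, pvOrNat_step, pvCastPowSub]

theorem pvPow_lt_succ (k : Nat) : (2 : Int) ^ k < (2 : Int) ^ (k + 1) := by
  have h : (0 : Int) < 2 ^ k := by positivity
  calc (2 : Int) ^ k < 2 ^ k + 2 ^ k := by omega
    _ = 2 ^ (k + 1) := by ring

-- the greedy OR scan over a sorted list of positive ints equals the power-of-two probe
theorem pvLoopA_eq (xs : List Int) : ∀ (k : Nat),
    xs.Pairwise (· ≤ ·) → (∀ x ∈ xs, 1 ≤ x) →
    pvLoopA xs ((2 : Int) ^ k - 1) = pvProbe xs ((2 : Int) ^ k) := by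
  induction xs with
  | nil =>
    intro k _ _
    conv_rhs => rw [pvProbe]
    simp [pvLoopA]
  | cons x xs ih =>
    intro k hpw hpos
    obtain ⟨hxle, hpw'⟩ := List.pairwise_cons.mp hpw
    have hx1 : (1 : Int) ≤ x := hpos x (List.mem_cons_self ..)
    have hpos' : ∀ y ∈ xs, (1 : Int) ≤ y := fun y hy => hpos y (List.mem_cons_of_mem _ hy)
    have hkpos : (0 : Int) < 2 ^ k := by positivity
    simp only [pvLoopA]
    by_cases hgt : x > (2 : Int) ^ k - 1 + 1
    · rw [if_pos hgt]
      conv_rhs => rw [pvProbe]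
      have hnm : ¬ ((2 : Int) ^ k ∈ x :: xs) := by
        intro hmem
        rcases List.mem_cons.mp hmem with heq | hmem'
        · omega
        · have := hxle _ hmem'
          omega
      rw [dif_neg (by tauto)]
      ring
    · rw [if_neg hgt]
      by_cases hxeq : x = (2 : Int) ^ k
      · rw [hxeq, pvOrInt_step k, ih (k + 1) hpw' hpos']
        conv_rhs => rw [pvProbe]
        rw [dif_pos ⟨hkpos, List.mem_cons_self ..⟩]
        have e : ((2 : Int) ^ k) <<< (1 : Nat) = (2 : Int) ^ (k + 1) := by
          rw [Int.shiftLeft_eq]; ring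
        rw [e]
        exact pvProbe_agree _ xs ((2 : Int) ^ k :: xs) _ le_rfl (fun q hq => by
          have hne : q ≠ (2 : Int) ^ k := by
            have := pvPow_lt_succ k
            omega
          simp [List.mem_cons, hne])
      · have hxlt : x < (2 : Int) ^ k := by omega
        rw [pvOrInt_absorb k x (by omega) hxlt, ih k hpw' hpos']
        exact pvProbe_agree _ xs (x :: xs) _ le_rfl (fun q hq => by
          have hne : q ≠ x := by omega
          simp [List.mem_cons, hne])

-- ===== VERDICT (by name: the statement is the Claim_ definition above) =====
theorem minImpossibleOR_spec : Claim_equal_minImpossibleOR := by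
  intro nums _hdom hpre
  unfold Spec_minImpossibleOR minImpossibleOR minImpossibleOR_alt
  cases hs : PySem.List.sorted nums (fun x => x) false with
  | nil => exact absurd ((PySem.List.sorted_eq_nil_iff nums _ false).mp hs) hpre
  | cons h t =>
    by_cases h1 : h = 1
    · simp only [h1, ne_eq, not_true_eq_false, if_false]
      have hpw : t.Pairwise (· ≤ ·) := by
        have := PySem.List.sorted_pairwise nums (fun x => x)
        rw [hs] at this
        exact (List.pairwise_cons.mp this).2
      have hmem1 : ∀ x ∈ t, (1 : Int) ≤ x := by
        have := PySem.List.sorted_pairwise nums (fun x => x)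
        rw [hs] at this
        intro x hx
        have := (List.pairwise_cons.mp this).1 x hx
        omega
      have e1 := pvLoopA_eq t 1 hpw hmem1
      norm_num at e1
      rw [e1]
      exact pvProbe_agree _ t (PySem.Set.ofList nums) 2 le_rfl (fun q hq => by
        rw [PySem.Set.mem_ofList, ← PySem.List.mem_sorted nums (fun x => x) false q, hs,
          List.mem_cons]
        have hne : q ≠ h := by omega
        simp [hne])
    · simp only [h1, ne_eq, not_false_eq_true, if_true]
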